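-- pv_equiv track=rewrite | github.com/tblazhev/HackBulgaria-Programming101 | Week_0/magic_string/solution.py | magic_string
-- ===== SOURCE A (Python) =====
-- def magic_string(string):
--     k = len(string) // 2
--     count_changes = 0
--     for index, char in enumerate(string):
--         if index < k and char == "<":
--             count_changes += 1
--         elif index >= k and char == ">":
--             count_changes += 1
--     return count_changes
-- ===== SOURCE B (Python) =====
-- def magic_string(string):
--     total = 0
--     i, j = 0, len(string) - 1
--     while i < j:
--         if string[i] == "<":
--             total += 1
--         if string[j] == ">":
--             total += 1
--         i, j = i + 1, j - 1
--     if i == j and string[i] == ">":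
--         total += 1
--     return total
-- ===== Notes on version B (the rewrite author's own statement) =====
-- stated objective: alternative
-- what changed: Replaces the midpoint-threshold enumerate loop with a two-pointer scan that walks inward from both ends, pairing a first-half and a second-half character per step (plus a middle-element check for odd length), with no midpoint computation at all.
import Mathlib
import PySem

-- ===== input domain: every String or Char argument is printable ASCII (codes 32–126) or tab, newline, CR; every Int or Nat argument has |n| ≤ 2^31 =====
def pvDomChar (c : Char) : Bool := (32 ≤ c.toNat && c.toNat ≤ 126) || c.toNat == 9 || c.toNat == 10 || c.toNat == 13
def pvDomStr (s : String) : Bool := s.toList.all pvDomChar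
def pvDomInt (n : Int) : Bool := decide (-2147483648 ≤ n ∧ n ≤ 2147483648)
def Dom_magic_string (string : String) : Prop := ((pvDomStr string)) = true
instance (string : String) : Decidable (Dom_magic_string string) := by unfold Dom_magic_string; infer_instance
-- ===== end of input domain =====

-- B replaces A's midpoint-threshold enumerate loop with a two-pointer scan from both ends (same cost, different algorithm).

-- ===== PORT A =====
-- k = len(string) // 2; loop over enumerate(string), branch on index vs k
def magic_string (string : String) : Int :=
  let k : Int := PySem.Int.floordiv (PySem.Str.len string) 2
  (PySem.List.enumerate string.toList 0).foldl
    (fun count_changes p =>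
      if p.1 < k ∧ p.2 = '<' then count_changes + 1
      else if k ≤ p.1 ∧ p.2 = '>' then count_changes + 1 else count_changes) 0

-- ===== PORT B =====
-- the while loop: two Int pointers i, j walking inward; string[i]/string[j] via pyGet?
-- (inside the loop 0 ≤ i < j < len, so pyGet? is always some; matching on it is exact)
def magic_string_go (t : List Char) (i j total : Int) : Int :=
  if i < j then
    let total := if PySem.List.pyGet? t i = some '<' then total + 1 else total
    let total := if PySem.List.pyGet? t j = some '>' then total + 1 else total
    magic_string_go t (i + 1) (j - 1) total
  else
    if i = j ∧ PySem.List.pyGet? t i = some '>' then total + 1 else total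
termination_by (j - i).toNat
decreasing_by omega

def magic_string_alt (string : String) : Int :=
  magic_string_go string.toList 0 (PySem.Str.len string - 1) 0

-- ===== PRECONDITION & SPEC =====
def Spec_magic_string (string : String) (out : Int) : Prop := out = magic_string_alt string
instance (string : String) (out : Int) : Decidable (Spec_magic_string string out) := by unfold Spec_magic_string; infer_instance

-- ===== CLAIM (what is proved, stated in full; the proofs are below) =====
def Claim_equal_magic_string : Prop := ∀ (string : String), Dom_magic_string string → Spec_magic_string string (magic_string string)

-- ===== LEMMAS AND PROOFS =====

-- common spec: count '<' in the first half, '>' in the second half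
def halfCounts (t : List Char) : Int :=
  ((t.take (t.length / 2)).count '<' : Int) + ((t.drop (t.length / 2)).count '>' : Int)

-- halfCounts on c :: (mid ++ [e]): peel both ends
theorem halfCounts_cons_append (c e : Char) (mid : List Char) :
    halfCounts (c :: (mid ++ [e]))
      = (if c = '<' then (1 : Int) else 0) + (if e = '>' then (1 : Int) else 0)
        + halfCounts mid := by
  simp only [halfCounts]
  have hlen : (c :: (mid ++ [e])).length = mid.length + 2 := by simp
  rw [hlen]
  have hk : (mid.length + 2) / 2 = mid.length / 2 + 1 := by omega
  rw [hk]
  have hle : mid.length / 2 ≤ mid.length := by omega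
  have htake : (c :: (mid ++ [e])).take (mid.length / 2 + 1)
      = c :: mid.take (mid.length / 2) := by
    rw [List.take_succ_cons, List.take_append_of_le_length hle]
  have hdrop : (c :: (mid ++ [e])).drop (mid.length / 2 + 1)
      = mid.drop (mid.length / 2) ++ [e] := by
    rw [List.drop_succ_cons, List.drop_append_of_le_length hle]
  rw [htake, hdrop]
  simp only [List.count_cons, List.count_append, List.count_nil]
  split_ifs <;> simp_all <;> ring

-- B's loop, on segment [a, b] of t (Nat indices), computes total + halfCounts of that segment
theorem magic_string_go_eq (t : List Char) :
    ∀ (n a b : Nat) (total : Int), b < t.length → a ≤ b + 1 → b + 1 - a = n →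
      magic_string_go t (a : Int) (b : Int) total
        = total + halfCounts ((t.drop a).take (b + 1 - a)) := by
  intro n
  induction n using Nat.strong_induction_on with
  | _ n ih =>
    intro a b total hb hab hn
    rcases Nat.lt_trichotomy a b with hlt | heq | hgt
    · -- loop body fires
      have ha : a < t.length := by omega
      have hij : (a : Int) < (b : Int) := by exact_mod_cast hlt
      have hga : PySem.List.pyGet? t (a : Int) = some t[a] := by
        simp [PySem.List.pyGet?_natCast, List.getElem?_eq_getElem ha]
      have hgb : PySem.List.pyGet? t (b : Int) = some t[b] := by
        simp [PySem.List.pyGet?_natCast, List.getElem?_eq_getElem hb]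
      have h1 : ((a : Int) + 1) = ((a + 1 : Nat) : Int) := by push_cast; ring
      have h2 : ((b : Int) - 1) = ((b - 1 : Nat) : Int) := by
        have hb1 : 1 ≤ b := by omega
        push_cast [hb1]; ring
      rw [magic_string_go, if_pos hij]
      simp only [hga, hgb, Option.some.injEq]
      rw [h1, h2,
        ih (b - 1 + 1 - (a + 1)) (by omega) (a + 1) (b - 1) _ (by omega) (by omega) rfl]
      -- decompose the segment: seg = t[a] :: mid ++ [t[b]]
      have hdrop : t.drop a = t[a] :: t.drop (a + 1) := List.drop_eq_getElem_cons ha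
      have hmidlast : (t.drop (a + 1)).take (b - a)
          = (t.drop (a + 1)).take (b - a - 1) ++ [t[b]] := by
        have hba : b - a = (b - a - 1) + 1 := by omega
        rw [hba, List.take_add_one]
        have hidx : a + 1 + (b - a - 1) = b := by omega
        have hgd : (t.drop (a + 1))[b - a - 1]? = some t[b] := by
          rw [List.getElem?_drop, hidx, List.getElem?_eq_getElem hb]
        simp [hgd]
      have hseg : (t.drop a).take (b + 1 - a)
          = t[a] :: ((t.drop (a + 1)).take (b - a - 1) ++ [t[b]]) := by
        rw [hdrop]
        have hba : b + 1 - a = (b - a) + 1 := by omega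
        rw [hba, List.take_succ_cons, ← hmidlast]
      rw [hseg]
      have hba2 : b - 1 + 1 - (a + 1) = b - a - 1 := by omega
      rw [hba2, halfCounts_cons_append]
      split_ifs <;> ring
    · -- i = j: the middle element
      subst heq
      rw [magic_string_go]
      rw [if_neg (by omega)]
      have hga : PySem.List.pyGet? t (a : Int) = some t[a] := by
        simp [PySem.List.pyGet?_natCast, List.getElem?_eq_getElem hb]
      have hseg : (t.drop a).take (a + 1 - a) = [t[a]] := by
        have h1 : a + 1 - a = 1 := by omega
        rw [h1, List.drop_eq_getElem_cons hb,
          show (1 : Nat) = 0 + 1 from rfl, List.take_succ_cons, List.take_zero]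
      rw [hseg]
      by_cases h : t[a] = '>'
      · rw [if_pos (by simp [hga, h])]
        simp [halfCounts, h]
      · rw [if_neg (by simp [hga, h])]
        simp [halfCounts, h]
    · -- i > j: empty segment (a = b + 1)
      rw [magic_string_go]
      rw [if_neg (by omega)]
      have ha : a = b + 1 := by omega
      rw [if_neg (by rintro ⟨hx, -⟩; omega)]
      have : b + 1 - a = 0 := by omega
      simp [this, halfCounts]

-- ===== VERDICT (by name: the statement is the Claim_ definition above) =====
theorem magic_string_spec : Claim_equal_magic_string := by
  intro s _
  unfold Spec_magic_string magic_string magic_string_alt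
  simp only []
  set t := s.toList with ht
  have hlen : PySem.Str.len s = (t.length : Int) := by simp [PySem.Str.len_eq, ht]
  have hk : PySem.Int.floordiv (PySem.Str.len s) 2 = ((t.length / 2 : Nat) : Int) := by
    rw [hlen]; exact_mod_cast PySem.Int.floordiv_natCast t.length 2
  set k : Nat := t.length / 2 with hkdef
  rw [hk, hlen]
  -- B side evaluates to halfCounts t
  have hB : magic_string_go t 0 ((t.length : Int) - 1) 0 = halfCounts t := by
    cases hcase : t.length with
    | zero =>
      have hnil : t = [] := List.length_eq_zero_iff.mp hcase
      rw [magic_string_go]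
      rw [if_neg (by norm_num)]
      rw [if_neg (by norm_num)]
      simp [hnil, halfCounts]
    | succ m =>
      have h1 : (((m + 1 : Nat) : Int) - 1) = ((m : Nat) : Int) := by push_cast; ring
      have h0 : ((0 : Nat) : Int) = (0 : Int) := rfl
      rw [h1, ← h0, magic_string_go_eq t (m + 1) 0 m _ (by omega) (by omega) rfl]
      rw [List.drop_zero, List.take_of_length_le (by omega)]
      simp
  rw [hB]
  -- A side: split the enumerate fold at index k
  have hsplit : t = t.take k ++ t.drop k := (List.take_append_drop k t).symm
  have hklen : (t.take k).length = k := by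
    simp [List.length_take]; omega
  conv_lhs => rw [show PySem.List.enumerate t 0
      = PySem.List.enumerate (t.take k) 0 ++ PySem.List.enumerate (t.drop k) (0 + (t.take k).length) by
        rw [← PySem.List.enumerate_append, ← hsplit]]
  rw [List.foldl_append]
  have hlow : ∀ (acc : Int) (p : Int × Char), p ∈ PySem.List.enumerate (t.take k) 0 →
      (if p.1 < ((k : Nat) : Int) ∧ p.2 = '<' then acc + 1
       else if ((k : Nat) : Int) ≤ p.1 ∧ p.2 = '>' then acc + 1 else acc)
      = (if p.2 == '<' then acc + 1 else acc) := by
    intro acc p hp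
    rw [PySem.List.mem_enumerate_iff] at hp
    obtain ⟨j, hj, rfl⟩ := hp
    rw [hklen] at hj
    have hjk : (0 : Int) + j < (k : Int) := by omega
    simp only [hjk, true_and]
    have hnk : ¬ (((k : Nat) : Int) ≤ 0 + (j : Int) ∧ (t.take k)[j] = '>') :=
      fun h => absurd h.1 (by omega)
    rw [if_neg hnk]
    simp [beq_iff_eq]
  have hhigh : ∀ (acc : Int) (p : Int × Char),
      p ∈ PySem.List.enumerate (t.drop k) (0 + (t.take k).length) →
      (if p.1 < ((k : Nat) : Int) ∧ p.2 = '<' then acc + 1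
       else if ((k : Nat) : Int) ≤ p.1 ∧ p.2 = '>' then acc + 1 else acc)
      = (if p.2 == '>' then acc + 1 else acc) := by
    intro acc p hp
    rw [PySem.List.mem_enumerate_iff] at hp
    obtain ⟨j, hj, rfl⟩ := hp
    have hjk : ¬ ((0 : Int) + (t.take k).length + j < (k : Int)) := by
      rw [hklen]; omega
    have hjk2 : ((k : Nat) : Int) ≤ 0 + (t.take k).length + j := by
      rw [hklen]; omega
    simp only [hjk, false_and, if_false, hjk2, true_and]
    simp [beq_iff_eq]
  have e1 : (PySem.List.enumerate (t.take k) 0).foldl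
      (fun (count_changes : Int) p =>
        if p.1 < ((k : Nat) : Int) ∧ p.2 = '<' then count_changes + 1
        else if ((k : Nat) : Int) ≤ p.1 ∧ p.2 = '>' then count_changes + 1 else count_changes) 0
      = (PySem.List.enumerate (t.take k) 0).foldl
          (fun (acc : Int) p => if p.2 == '<' then acc + 1 else acc) 0 := by
    apply PySem.List.foldl_congr_mem; exact hlow
  have e2 : ∀ (init : Int), (PySem.List.enumerate (t.drop k) (0 + (t.take k).length)).foldl
      (fun (count_changes : Int) p =>
        if p.1 < ((k : Nat) : Int) ∧ p.2 = '<' then count_changes + 1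
        else if ((k : Nat) : Int) ≤ p.1 ∧ p.2 = '>' then count_changes + 1 else count_changes) init
      = (PySem.List.enumerate (t.drop k) (0 + (t.take k).length)).foldl
          (fun acc p => if p.2 == '>' then acc + 1 else acc) init := by
    intro init; apply PySem.List.foldl_congr_mem; exact hhigh
  rw [e1, e2]
  have e3 : ∀ (l : List (Int × Char)) (c : Char) (a : Int),
      l.foldl (fun acc p => if p.2 == c then acc + 1 else acc) a
        = a + ((l.map Prod.snd).count c : Int) := by
    intro l c a
    induction l generalizing a with
    | nil => simp
    | cons x xs ih =>
      simp only [List.foldl_cons, List.map_cons, List.count_cons, ih]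
      by_cases hx : x.2 = c <;> simp [hx] <;> ring
  rw [e3, e3]
  simp only [PySem.List.map_snd_enumerate]
  simp only [halfCounts, ← hkdef]
  ring
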